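-- pv_equiv track=rewrite | github.com/Rakib-Mahmud/Change-in-Hierarchy-of-the-Financial-Networks-A-Study-on-Firms-of-an-Emergent-Market-in-Bangladesh | Hierarchy_Measurment.py | isHierarchical
-- ===== SOURCE A (Python) =====
-- def isHierarchical(path):
--     #If an up-path or down-path exist, the path is hierarchical
--     if (all(path[i] <= path[i+1] for i in range(len(path)-1))) or (all(path[i] >= path[i+1] for i in range(len(path)-1))):
--         return True
--     #If an up-path followed by a down-path exist, the path is hierarchical
--     i = 0
--     last_idx = len(path)-1
--     if i<last_idx and path[i]<=path[i+1]:
--         while i<last_idx and path[i]<=path[i+1]: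
--             i+=1
--         if i<last_idx and path[i]>=path[i+1]:
--             while i<last_idx and path[i]>=path[i+1]:
--                 i+=1
--     if i == last_idx:
--         return True
--
--     return False
-- ===== SOURCE B (Python) =====
-- def isHierarchical(path):
--     # One stateful forward pass: reject exactly the paths with an ascent after a descent.
--     descending = False
--     for a, b in zip(path, path[1:]):
--         if a < b:
--             if descending:
--                 return False
--         elif a > b:
--             descending = True
--     return True
-- ===== Notes on version B (the rewrite author's own statement) =====
-- stated objective: simpler
-- what changed: Replaced two full all() scans plus two index-driven while loops by a single forward pass over adjacent pairs carrying one boolean 'descending' flag.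
import Mathlib
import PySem

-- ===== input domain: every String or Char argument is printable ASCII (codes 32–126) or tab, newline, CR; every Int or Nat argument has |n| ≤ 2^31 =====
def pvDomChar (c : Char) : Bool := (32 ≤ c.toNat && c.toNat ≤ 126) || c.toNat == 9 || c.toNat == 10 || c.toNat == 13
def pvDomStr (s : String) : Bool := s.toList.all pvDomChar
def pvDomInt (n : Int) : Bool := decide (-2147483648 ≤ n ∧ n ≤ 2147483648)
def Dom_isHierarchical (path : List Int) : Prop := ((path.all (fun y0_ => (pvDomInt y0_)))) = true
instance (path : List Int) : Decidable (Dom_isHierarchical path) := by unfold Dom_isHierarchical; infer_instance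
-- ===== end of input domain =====

-- B replaces A's two all() scans plus two index-driven while loops by one forward pass
-- over adjacent pairs carrying a single 'descending' flag (objective: simpler).

-- ===== PORT A =====
-- 'while i<last_idx and path[i]<=path[i+1]: i+=1' — indices are guarded in range and
-- nonnegative, so Nat-indexed getD is exact here.
def upWhile (path : List Int) (i : Nat) : Nat :=
  if i < path.length - 1 ∧ path.getD i 0 ≤ path.getD (i+1) 0 then
    upWhile path (i+1)
  else i
termination_by path.length - 1 - i
decreasing_by omega

-- 'while i<last_idx and path[i]>=path[i+1]: i+=1'
def downWhile (path : List Int) (i : Nat) : Nat :=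
  if i < path.length - 1 ∧ path.getD (i+1) 0 ≤ path.getD i 0 then
    downWhile path (i+1)
  else i
termination_by path.length - 1 - i
decreasing_by omega

def isHierarchical (path : List Int) : Bool :=
  -- all(path[i] <= path[i+1] ...) or all(path[i] >= path[i+1] ...)
  if ((List.range (path.length - 1)).all (fun i => decide (path.getD i 0 ≤ path.getD (i+1) 0)))
     || ((List.range (path.length - 1)).all (fun i => decide (path.getD (i+1) 0 ≤ path.getD i 0))) then
    true
  else
    let last := path.length - 1
    let i : Nat :=
      if 0 < last ∧ path.getD 0 0 ≤ path.getD 1 0 then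
        let i1 := upWhile path 0
        if i1 < last ∧ path.getD (i1+1) 0 ≤ path.getD i1 0 then downWhile path i1 else i1
      else 0
    if i = last then true else false

-- ===== PORT B =====
-- the for-loop over zip(path, path[1:]) with the 'descending' flag
def altGo : List Int → Bool → Bool
  | a :: b :: rest, descending =>
    if a < b then
      (if descending then false else altGo (b :: rest) descending)
    else if b < a then altGo (b :: rest) true
    else altGo (b :: rest) descending
  | _, _ => true

def isHierarchical_alt (path : List Int) : Bool := altGo path false

-- ===== PRECONDITION & SPEC =====
def Spec_isHierarchical (path : List Int) (out : Bool) : Prop := out = isHierarchical_alt path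
instance (path : List Int) (out : Bool) : Decidable (Spec_isHierarchical path out) := by unfold Spec_isHierarchical; infer_instance

-- ===== CLAIM (what is proved, stated in full; the proofs are below) =====
def Claim_equal_isHierarchical : Prop := ∀ (path : List Int), Dom_isHierarchical path → Spec_isHierarchical path (isHierarchical path)

-- ===== LEMMAS AND PROOFS =====

-- step predicates and two intermediate characterisations of "hierarchical"
def stepLe (path : List Int) (k : Nat) : Prop := path.getD k 0 ≤ path.getD (k+1) 0
def stepGe (path : List Int) (k : Nat) : Prop := path.getD (k+1) 0 ≤ path.getD k 0
def UpBelow (path : List Int) (j : Nat) : Prop := ∀ k, k < j → stepLe path k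
def DownFrom (path : List Int) (j : Nat) : Prop := ∀ k, j ≤ k → k < path.length - 1 → stepGe path k
def ISpec (path : List Int) : Prop :=
  ∃ j, j ≤ path.length - 1 ∧ UpBelow path j ∧ DownFrom path j
def SSpec (path : List Int) : Prop :=
  ∃ u v, path = u ++ v ∧ List.IsChain (· ≤ ·) u ∧ List.IsChain (fun a b : Int => b ≤ a) v

theorem stepLe_or_stepGe (path : List Int) (k : Nat) : stepLe path k ∨ stepGe path k :=
  le_total (path.getD k 0) (path.getD (k+1) 0)

theorem upWhile_spec (path : List Int) (i : Nat) (h : i ≤ path.length - 1) :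
    i ≤ upWhile path i ∧ upWhile path i ≤ path.length - 1 ∧
    (∀ k, i ≤ k → k < upWhile path i → stepLe path k) ∧
    (upWhile path i < path.length - 1 → ¬ stepLe path (upWhile path i)) := by
  rw [upWhile]
  split
  · next hc =>
    have IH := upWhile_spec path (i+1) (by omega)
    refine ⟨by omega, IH.2.1, ?_, IH.2.2.2⟩
    intro k hk1 hk2
    rcases Nat.eq_or_lt_of_le hk1 with rfl | hk
    · exact hc.2
    · exact IH.2.2.1 k hk hk2
  · next hc =>
    refine ⟨le_refl _, h, fun k hk1 hk2 => absurd hk2 (by omega), ?_⟩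
    intro hlt hle
    exact hc ⟨hlt, hle⟩
termination_by path.length - 1 - i

theorem downWhile_spec (path : List Int) (i : Nat) (h : i ≤ path.length - 1) :
    i ≤ downWhile path i ∧ downWhile path i ≤ path.length - 1 ∧
    (∀ k, i ≤ k → k < downWhile path i → stepGe path k) ∧
    (downWhile path i < path.length - 1 → ¬ stepGe path (downWhile path i)) := by
  rw [downWhile]
  split
  · next hc =>
    have IH := downWhile_spec path (i+1) (by omega)
    refine ⟨by omega, IH.2.1, ?_, IH.2.2.2⟩
    intro k hk1 hk2
    rcases Nat.eq_or_lt_of_le hk1 with rfl | hk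
    · exact hc.2
    · exact IH.2.2.1 k hk hk2
  · next hc =>
    refine ⟨le_refl _, h, fun k hk1 hk2 => absurd hk2 (by omega), ?_⟩
    intro hlt hle
    exact hc ⟨hlt, hle⟩
termination_by path.length - 1 - i

theorem allUp_iff (path : List Int) :
    ((List.range (path.length - 1)).all (fun i => decide (path.getD i 0 ≤ path.getD (i+1) 0)) = true)
      ↔ ∀ k, k < path.length - 1 → stepLe path k := by
  simp [List.all_eq_true, stepLe]

theorem allDown_iff (path : List Int) :
    ((List.range (path.length - 1)).all (fun i => decide (path.getD (i+1) 0 ≤ path.getD i 0)) = true)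
      ↔ ∀ k, k < path.length - 1 → stepGe path k := by
  simp [List.all_eq_true, stepGe]

theorem A_iff_ISpec (path : List Int) : isHierarchical path = true ↔ ISpec path := by
  unfold isHierarchical
  split
  · next hall =>
    simp only [Bool.or_eq_true] at hall
    constructor
    · intro _
      rcases hall with hup | hdn
      · exact ⟨path.length - 1, le_refl _, fun k hk => (allUp_iff path).mp hup k hk,
          fun k hk1 hk2 => absurd hk2 (by omega)⟩
      · exact ⟨0, Nat.zero_le _, fun k hk => absurd hk (Nat.not_lt_zero k),
          fun k _ hk2 => (allDown_iff path).mp hdn k hk2⟩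
    · intro _; rfl
  · next hall =>
    simp only [Bool.or_eq_true, not_or] at hall
    obtain ⟨hnup, hndn⟩ := hall
    have hup' : ¬ ∀ k, k < path.length - 1 → stepLe path k :=
      fun hx => hnup ((allUp_iff path).mpr hx)
    have hdn' : ¬ ∀ k, k < path.length - 1 → stepGe path k :=
      fun hx => hndn ((allDown_iff path).mpr hx)
    simp only []
    split
    · next hguard =>
      obtain ⟨hlast, hstep0⟩ := hguard
      have hw := upWhile_spec path 0 (Nat.zero_le _)
      obtain ⟨-, hw2, hw3, hw4⟩ := hw
      split
      · next hinner =>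
        obtain ⟨hi1, hge1⟩ := hinner
        have hd := downWhile_spec path (upWhile path 0) hw2
        obtain ⟨hd1, hd2, hd3, hd4⟩ := hd
        constructor
        · intro hres
          have hres' : downWhile path (upWhile path 0) = path.length - 1 := by
            by_contra hne
            simp [hne] at hres
          refine ⟨upWhile path 0, hw2, fun k hk => hw3 k (Nat.zero_le _) hk, ?_⟩
          intro k hk1 hk2
          exact hd3 k hk1 (by omega)
        · intro ⟨j, hj, hu, hd'⟩
          have hji : j ≤ upWhile path 0 := by
            by_contra hlt
            push Not at hlt
            exact (hw4 (by omega)) (hu _ hlt)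
          have hres' : downWhile path (upWhile path 0) = path.length - 1 := by
            by_contra hne
            have hlt : downWhile path (upWhile path 0) < path.length - 1 := by omega
            exact (hd4 hlt) (hd' _ (by omega) hlt)
          simp [hres']
      · next hinner =>
        have hi1 : upWhile path 0 = path.length - 1 := by
          by_contra hne
          have hlt : upWhile path 0 < path.length - 1 := by omega
          rcases stepLe_or_stepGe path (upWhile path 0) with hle | hge
          · exact (hw4 hlt) hle
          · exact hinner ⟨hlt, hge⟩
        simp only [hi1]
        constructor
        · intro _
          exact ⟨path.length - 1, le_refl _,
            fun k hk => hw3 k (Nat.zero_le _) (by omega),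
            fun k hk1 hk2 => absurd hk2 (by omega)⟩
        · intro _; rfl
    · next hguard =>
      push Not at hguard
      have hlast : 0 < path.length - 1 := by
        by_contra h0
        exact hup' (fun k hk => absurd hk (by omega))
      have hn0 : ¬ stepLe path 0 := by
        intro hx
        have := hguard hlast
        unfold stepLe at hx
        simp only [Nat.zero_add] at hx
        omega
      have hne : ¬ (0 = path.length - 1) := by omega
      simp only [if_neg hne]
      constructor
      · intro hfalse
        exact absurd hfalse (by simp)
      · intro ⟨j, hj, hu, hd⟩
        rcases Nat.eq_zero_or_pos j with rfl | hjpos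
        · exact absurd (fun k hk2 => hd k (Nat.zero_le k) hk2) hdn'
        · exact absurd (hu 0 hjpos) hn0

theorem isChain_iff_getD (R : Int → Int → Prop) (l : List Int) :
    List.IsChain R l ↔ ∀ k, k + 1 < l.length → R (l.getD k 0) (l.getD (k+1) 0) := by
  rw [List.isChain_iff_getElem]
  constructor
  · intro h k hk
    rw [List.getD_eq_getElem l 0 (by omega), List.getD_eq_getElem l 0 hk]
    exact h k hk
  · intro h k hk
    have := h k hk
    rwa [List.getD_eq_getElem l 0 (by omega), List.getD_eq_getElem l 0 hk] at this

theorem getD_append_left' (u v : List Int) (n : Nat) (h : n < u.length) :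
    (u ++ v).getD n 0 = u.getD n 0 := by
  simp [List.getD_eq_getElem?_getD, List.getElem?_append_left h]

theorem getD_append_right' (u v : List Int) (n : Nat) (h : u.length ≤ n) :
    (u ++ v).getD n 0 = v.getD (n - u.length) 0 := by
  simp [List.getD_eq_getElem?_getD, List.getElem?_append_right h]

theorem ISpec_iff_SSpec (path : List Int) : ISpec path ↔ SSpec path := by
  constructor
  · rintro ⟨j, hj, hu, hd⟩
    refine ⟨path.take j, path.drop j, (List.take_append_drop j path).symm, ?_, ?_⟩
    · rw [isChain_iff_getD]
      intro k hk
      simp only [List.length_take] at hk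
      have hk1 : k + 1 < j := by omega
      have hk2 : k + 1 < path.length := by omega
      rw [List.getD_eq_getElem _ 0 (by simp; omega), List.getD_eq_getElem _ 0 (by simp; omega)]
      simp only [List.getElem_take]
      have := hu k (by omega)
      rwa [stepLe, List.getD_eq_getElem path 0 (by omega), List.getD_eq_getElem path 0 hk2] at this
    · rw [isChain_iff_getD]
      intro k hk
      simp only [List.length_drop] at hk
      have hk2 : j + (k + 1) < path.length := by omega
      rw [List.getD_eq_getElem _ 0 (by simp; omega), List.getD_eq_getElem _ 0 (by simp; omega)]
      simp only [List.getElem_drop]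
      have := hd (j + k) (by omega) (by omega)
      rw [stepGe, List.getD_eq_getElem path 0 (by omega), List.getD_eq_getElem path 0 (by omega)] at this
      convert this using 2
  · rintro ⟨u, v, rfl, cu, cv⟩
    have hlen : (u ++ v).length = u.length + v.length := by simp
    have hu' : ∀ k, k + 1 < u.length → stepLe (u ++ v) k := by
      intro k hk
      have := (isChain_iff_getD _ u).mp cu k hk
      rwa [stepLe, getD_append_left' u v k (by omega), getD_append_left' u v (k+1) hk]
    have hv' : ∀ k, u.length ≤ k → k + 1 < (u ++ v).length → stepGe (u ++ v) k := by
      intro k hk1 hk2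
      have hk3 : (k + 1) - u.length < v.length := by omega
      have := (isChain_iff_getD _ v).mp cv (k - u.length) (by omega)
      rw [stepGe, getD_append_right' u v k hk1, getD_append_right' u v (k+1) (by omega)]
      have heq : k + 1 - u.length = k - u.length + 1 := by omega
      rwa [heq]
    rcases Nat.eq_zero_or_pos u.length with hu0 | hupos
    · refine ⟨0, Nat.zero_le _, fun k hk => absurd hk (Nat.not_lt_zero k), ?_⟩
      intro k _ hk2
      exact hv' k (by omega) (by omega)
    · rcases Nat.lt_or_ge u.length (u ++ v).length with hul | hur
      · rcases stepLe_or_stepGe (u ++ v) (u.length - 1) with hj | hj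
        · refine ⟨u.length, by omega, ?_, ?_⟩
          · intro k hk
            rcases Nat.lt_or_ge (k + 1) u.length with h1 | h1
            · exact hu' k h1
            · have : k = u.length - 1 := by omega
              rwa [this]
          · intro k hk1 hk2
            exact hv' k hk1 (by omega)
        · refine ⟨u.length - 1, by omega, ?_, ?_⟩
          · intro k hk
            exact hu' k (by omega)
          · intro k hk1 hk2
            rcases Nat.lt_or_ge k u.length with h1 | h1
            · have : k = u.length - 1 := by omega
              rwa [this]
            · exact hv' k h1 (by omega)
      · refine ⟨(u ++ v).length - 1, by omega, ?_, ?_⟩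
        · intro k hk
          exact hu' k (by omega)
        · intro k hk1 hk2
          omega

theorem altGo_true_iff (l : List Int) :
    altGo l true = true ↔ List.IsChain (fun a b : Int => b ≤ a) l := by
  induction l with
  | nil => simp [altGo]
  | cons a t ih =>
    cases t with
    | nil => simp [altGo]
    | cons b r =>
      rw [altGo]
      by_cases h1 : a < b
      · simp only [if_pos h1]
        constructor
        · intro h; exact absurd h (by simp)
        · intro hch
          have := (List.isChain_cons_cons.mp hch).1
          omega
      · have hba : b ≤ a := by omega
        by_cases h2 : b < a <;>
          simp [h1, h2, ih, List.isChain_cons_cons, hba]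

theorem SSpec_cons_lt {a b : Int} {r : List Int} (h : a < b) :
    SSpec (a :: b :: r) ↔ SSpec (b :: r) := by
  constructor
  · rintro ⟨u, v, heq, cu, cv⟩
    cases u with
    | nil =>
      simp only [List.nil_append] at heq
      rw [← heq] at cv
      have := (List.isChain_cons_cons.mp cv).1
      omega
    | cons x u' =>
      simp only [List.cons_append, List.cons.injEq] at heq
      exact ⟨u', v, heq.2, cu.tail, cv⟩
  · rintro ⟨u, v, heq, cu, cv⟩
    cases u with
    | nil =>
      simp only [List.nil_append] at heq
      exact ⟨[a], b :: r, by simp [heq], List.isChain_singleton a, heq ▸ cv⟩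
    | cons x u' =>
      simp only [List.cons_append, List.cons.injEq] at heq
      obtain ⟨rfl, hr⟩ := heq
      exact ⟨a :: b :: u', v, by simp [hr], List.isChain_cons_cons.mpr ⟨by omega, cu⟩, cv⟩
  
theorem SSpec_cons_gt {a b : Int} {r : List Int} (h : b < a) :
    SSpec (a :: b :: r) ↔ List.IsChain (fun a b : Int => b ≤ a) (b :: r) := by
  constructor
  · rintro ⟨u, v, heq, cu, cv⟩
    cases u with
    | nil =>
      simp only [List.nil_append] at heq
      rw [← heq] at cv
      exact cv.tail
    | cons x u' =>
      cases u' with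
      | nil =>
        simp only [List.cons_append, List.nil_append, List.cons.injEq] at heq
        rw [← heq.2] at cv
        exact cv
      | cons y u'' =>
        simp only [List.cons_append, List.cons.injEq] at heq
        have h1 := (List.isChain_cons_cons.mp cu).1
        omega
  · intro hch
    exact ⟨[], a :: b :: r, rfl, List.isChain_nil,
      List.isChain_cons_cons.mpr ⟨by omega, hch⟩⟩

theorem SSpec_cons_eq {a b : Int} {r : List Int} (h1 : ¬ a < b) (h2 : ¬ b < a) :
    SSpec (a :: b :: r) ↔ SSpec (b :: r) := by
  have hab : a = b := by omega
  constructor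
  · rintro ⟨u, v, heq, cu, cv⟩
    cases u with
    | nil =>
      simp only [List.nil_append] at heq
      rw [← heq] at cv
      exact ⟨[], b :: r, rfl, List.isChain_nil, cv.tail⟩
    | cons x u' =>
      simp only [List.cons_append, List.cons.injEq] at heq
      exact ⟨u', v, heq.2, cu.tail, cv⟩
  · rintro ⟨u, v, heq, cu, cv⟩
    cases u with
    | nil =>
      simp only [List.nil_append] at heq
      subst heq
      exact ⟨[], a :: b :: r, rfl, List.isChain_nil,
        List.isChain_cons_cons.mpr ⟨by omega, cv⟩⟩
    | cons x u' =>
      simp only [List.cons_append, List.cons.injEq] at heq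
      obtain ⟨rfl, hr⟩ := heq
      exact ⟨a :: b :: u', v, by simp [hr], List.isChain_cons_cons.mpr ⟨by omega, cu⟩, cv⟩

theorem altGo_false_iff (l : List Int) : altGo l false = true ↔ SSpec l := by
  induction l with
  | nil => simpa [altGo] using ⟨[], [], rfl, List.isChain_nil, List.isChain_nil⟩
  | cons a t ih =>
    cases t with
    | nil =>
      simpa [altGo] using ⟨[a], [], by simp, List.isChain_singleton a, List.isChain_nil⟩
    | cons b r =>
      rw [altGo]
      by_cases h1 : a < b
      · simp only [if_pos h1, Bool.false_eq_true, if_false]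
        rw [ih, SSpec_cons_lt h1]
      · by_cases h2 : b < a
        · simp only [if_neg h1, if_pos h2]
          rw [altGo_true_iff, SSpec_cons_gt h2]
        · simp only [if_neg h1, if_neg h2]
          rw [ih, SSpec_cons_eq h1 h2]

-- ===== VERDICT (by name: the statement is the Claim_ definition above) =====
theorem isHierarchical_spec : Claim_equal_isHierarchical := by
  intro path _
  unfold Spec_isHierarchical isHierarchical_alt
  rw [Bool.eq_iff_iff, A_iff_ISpec path, ISpec_iff_SSpec path]
  exact (altGo_false_iff path).symm
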